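-- pv_equiv track=rewrite | github.com/trunghieu11/PythonAlgorithm | Topcoder/archive/CountryGroup.py | solve
-- ===== SOURCE A (Python) =====
-- def solve(a):
--     a = list(a)
--     t = [[i]*i for i in range(1, 101)]
--     sumx =0
--     while a:
--         i0 = a[0]
--         if a[:i0] in t:
--             a = a[i0:]
--             sumx += 1
--         else:
--             return -1
--     return sumx
-- ===== SOURCE B (Python) =====
-- def solve(a):
--     count = 0
--     need = 0
--     val = 0
--     for x in a:
--         if need == 0:
--             if x < 1 or x > 100:
--                 return -1
--             val = x
--             need = x - 1
--             count += 1
--         elif x != val: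
--             return -1
--         else:
--             need -= 1
--     return count if need == 0 else -1
-- ===== Notes on version B (the rewrite author's own statement) =====
-- stated objective: faster
-- what changed: Replaced A's per-block list slicing and membership scan of a precomputed table of 100 block patterns by a single left-to-right pass with a tiny state machine (copies still needed, block value, block count) that never slices or builds the table.
import Mathlib
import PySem

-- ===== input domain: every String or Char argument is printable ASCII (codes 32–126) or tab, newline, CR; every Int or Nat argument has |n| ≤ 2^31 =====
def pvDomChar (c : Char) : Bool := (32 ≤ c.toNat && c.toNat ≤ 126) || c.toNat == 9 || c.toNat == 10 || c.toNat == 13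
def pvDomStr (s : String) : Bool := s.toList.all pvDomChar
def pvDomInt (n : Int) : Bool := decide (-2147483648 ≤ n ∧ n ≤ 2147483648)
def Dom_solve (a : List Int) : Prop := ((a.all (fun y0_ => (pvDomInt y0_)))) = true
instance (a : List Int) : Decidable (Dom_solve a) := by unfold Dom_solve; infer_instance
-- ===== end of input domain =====

-- B replaces A's slice-and-table scan by a single state-machine pass over the list (objective: faster, constant-factor).


-- ===== PORT A =====
-- t = [[i]*i for i in range(1, 101)]
def tTable : List (List Int) := (PySem.List.pyRange 1 101 1).map (fun i => List.replicate i.toNat i)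

-- the while-loop, with a fuel parameter only to make the recursion structural
-- (fuel a.length + 1 is enough: each accepted block removes at least one element)
def solveLoop : Nat → List Int → Int → Int
  | 0, _, _ => -1
  | _ + 1, [], sumx => sumx
  | fuel + 1, x :: r, sumx =>
    if tTable.contains (PySem.List.slice (x :: r) none (some x)) = true then
      solveLoop fuel (PySem.List.slice (x :: r) (some x) none) (sumx + 1)
    else -1

def solve (a : List Int) : Int := solveLoop (a.length + 1) a 0

-- ===== PORT B =====
inductive BSt where
  | fail : BSt
  | run : Int → Int → Int → BSt   -- need, val, count
deriving DecidableEq, Repr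

def bStep (s : BSt) (x : Int) : BSt :=
  match s with
  | .fail => .fail
  | .run need val cnt =>
    if need = 0 then
      if x < 1 ∨ 100 < x then .fail
      else .run (x - 1) x (cnt + 1)
    else if x ≠ val then .fail
    else .run (need - 1) val cnt

def bFinish (s : BSt) : Int :=
  match s with
  | .fail => -1
  | .run need _ cnt => if need = 0 then cnt else -1

def solve_alt (a : List Int) : Int := bFinish (a.foldl bStep (.run 0 0 0))

-- ===== PRECONDITION & SPEC =====
def Spec_solve (a : List Int) (out : Int) : Prop := out = solve_alt a
instance (a : List Int) (out : Int) : Decidable (Spec_solve a out) := by unfold Spec_solve; infer_instance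

-- ===== CLAIM (what is proved, stated in full; the proofs are below) =====
def Claim_equal_solve : Prop := ∀ (a : List Int), Dom_solve a → Spec_solve a (solve a)

-- ===== LEMMAS AND PROOFS =====

-- a[:x] is always some prefix xs.take k (used by the characterisation and by termination)
theorem slice_to_is_take (xs : List Int) (x : Int) :
    ∃ k : Nat, PySem.List.slice xs none (some x) = xs.take k := by
  rcases (by omega : 0 ≤ x ∨ x < 0) with hx | hx
  · exact ⟨x.toNat, PySem.List.slice_to xs hx⟩
  · have hk : 0 < (-x).toNat := by omega
    have hx' : x = -(((-x).toNat : Nat) : Int) := by omega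
    refine ⟨xs.length - (-x).toNat, ?_⟩
    rw [hx', PySem.List.slice_to_neg_natCast xs ((-x).toNat) hk]
    congr 1
    omega

-- the test "a[:a[0]] in t" says exactly: 1 ≤ a[0] ≤ 100 and a starts with a[0] copies of a[0]
theorem contains_slice_iff (x : Int) (r : List Int) :
    tTable.contains (PySem.List.slice (x :: r) none (some x)) = true ↔
      1 ≤ x ∧ x ≤ 100 ∧ x.toNat ≤ (x :: r).length ∧
        (x :: r).take x.toNat = List.replicate x.toNat x := by
  constructor
  · intro h
    rw [List.contains_iff_mem] at h
    simp only [tTable, List.mem_map] at h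
    obtain ⟨j, hj, hrep⟩ := h
    rw [PySem.List.mem_pyRange_one] at hj
    obtain ⟨k, hk⟩ := slice_to_is_take (x :: r) x
    rw [hk] at hrep
    have hjpos : 0 < j.toNat := by omega
    obtain ⟨m, hm⟩ : ∃ m, j.toNat = m + 1 := ⟨j.toNat - 1, by omega⟩
    have hjx : j = x := by
      rcases k with _ | k
      · rw [hm] at hrep; simp [List.replicate_succ] at hrep
      · rw [hm] at hrep; simp [List.replicate_succ, List.take_succ_cons] at hrep
        exact hrep.1
    subst hjx
    have hslice : PySem.List.slice (j :: r) none (some j) = (j :: r).take j.toNat :=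
      PySem.List.slice_to _ (by omega)
    have hrep' : (j :: r).take j.toNat = List.replicate j.toNat j := by
      rw [← hslice, hk, ← hrep]
    have hlen := congrArg List.length hrep'
    simp [List.length_take, List.length_replicate] at hlen
    exact ⟨hj.1, by omega, by simp; omega, hrep'⟩
  · rintro ⟨hx1, hx100, hlen, htake⟩
    rw [List.contains_iff_mem]
    simp only [tTable, List.mem_map]
    refine ⟨x, ?_, ?_⟩
    · rw [PySem.List.mem_pyRange_one]; omega
    · rw [PySem.List.slice_to _ (by omega : (0:Int) ≤ x), htake]

theorem foldl_bStep_fail (l : List Int) : l.foldl bStep .fail = .fail := by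
  induction l with
  | nil => rfl
  | cons y l ih => simpa [bStep] using ih

-- while the expected block matches, the fold just walks through it
theorem foldl_bStep_consume (k : Nat) (l : List Int) (v cnt : Int)
    (hlen : k ≤ l.length) (htake : l.take k = List.replicate k v) :
    l.foldl bStep (.run (k : Int) v cnt) = (l.drop k).foldl bStep (.run 0 v cnt) := by
  induction k generalizing l with
  | zero => simp
  | succ m ih =>
    rcases l with _ | ⟨y, l'⟩
    · simp at hlen
    · simp [List.take_succ_cons, List.replicate_succ] at htake
      obtain ⟨hy, ht⟩ := htake
      subst hy
      have h0 : ¬ ((m + 1 : Nat) : Int) = 0 := by push_cast; omega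
      have hstep : bStep (.run ((m + 1 : Nat) : Int) y cnt) y = .run ((m : Nat) : Int) y cnt := by
        simp [bStep]; intro habs; exfalso; omega
      simp only [List.foldl_cons, List.drop_succ_cons]
      rw [hstep]
      exact ih l' (by simpa using hlen) ht

-- if the expected block does not match, the run ends in -1
theorem foldl_bStep_mismatch (l : List Int) (k : Nat) (v cnt : Int) (hk : 1 ≤ k)
    (hbad : ¬ (k ≤ l.length ∧ l.take k = List.replicate k v)) :
    bFinish (l.foldl bStep (.run (k : Int) v cnt)) = -1 := by
  induction l generalizing k with
  | nil =>
    simp [bFinish]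
    omega
  | cons y l ih =>
    obtain ⟨m, hm⟩ : ∃ m, k = m + 1 := ⟨k - 1, by omega⟩
    subst hm
    have h0 : ¬ ((m + 1 : Nat) : Int) = 0 := by push_cast; omega
    by_cases hy : y = v
    · subst hy
      have hstep : bStep (.run ((m + 1 : Nat) : Int) y cnt) y = .run ((m : Nat) : Int) y cnt := by
        simp [bStep]; intro habs; exfalso; omega
      rcases Nat.eq_zero_or_pos m with hm0 | hmpos
      · subst hm0
        exact absurd ⟨by simp, by simp [List.replicate_succ]⟩ hbad
      · simp only [List.foldl_cons]
        rw [hstep]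
        refine ih m (by omega) ?_
        rintro ⟨h1, h2⟩
        exact hbad ⟨by simpa using Nat.succ_le_succ h1,
          by simp [List.take_succ_cons, List.replicate_succ, h2]⟩
    · have hstep : bStep (.run ((m + 1 : Nat) : Int) v cnt) y = .fail := by
        simp [bStep, hy]; omega
      simp only [List.foldl_cons]
      rw [hstep, foldl_bStep_fail]
      rfl

theorem main_loop_aux (n : Nat) :
    ∀ (a : List Int), a.length < n → ∀ (v cnt : Int),
      solveLoop n a cnt = bFinish (a.foldl bStep (.run 0 v cnt)) := by
  induction n with
  | zero => intro a ha; omega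
  | succ n ih =>
    intro a ha v cnt
    rcases a with _ | ⟨x, r⟩
    · simp [solveLoop, bFinish]
    by_cases hc : tTable.contains (PySem.List.slice (x :: r) none (some x)) = true
    · obtain ⟨hx1, hx100, hlen, htake⟩ := (contains_slice_iff x r).mp hc
      obtain ⟨m, hm⟩ : ∃ m, x.toNat = m + 1 := ⟨x.toNat - 1, by omega⟩
      rw [hm, List.take_succ_cons, List.replicate_succ, List.cons.injEq] at htake
      rw [solveLoop, if_pos hc, PySem.List.slice_from _ (by omega : (0:Int) ≤ x), hm]
      simp only [List.drop_succ_cons]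
      have hstep : bStep (.run 0 v cnt) x = .run ((m : Nat) : Int) x (cnt + 1) := by
        have hx : ¬ (x < 1 ∨ 100 < x) := by omega
        simp [bStep, hx]; omega
      rw [List.foldl_cons, hstep,
        foldl_bStep_consume m r x (cnt + 1) (by simp at hlen; omega) htake.2]
      have hxr : m + 1 ≤ (x :: r).length := by omega
      exact ih (r.drop m) (by simp at ha hxr ⊢; omega) x (cnt + 1)
    · rw [solveLoop, if_neg hc]
      rw [contains_slice_iff] at hc
      push Not at hc
      by_cases hrange : 1 ≤ x ∧ x ≤ 100
      · obtain ⟨hx1, hx100⟩ := hrange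
        have hstep : bStep (.run 0 v cnt) x = .run (x - 1) x (cnt + 1) := by
          have hx : ¬ (x < 1 ∨ 100 < x) := by omega
          simp [bStep, hx]
        obtain ⟨m, hm⟩ : ∃ m, x.toNat = m + 1 := ⟨x.toNat - 1, by omega⟩
        have hx1' : x - 1 = ((m : Nat) : Int) := by omega
        have hmpos : 1 ≤ m := by
          rcases Nat.eq_zero_or_pos m with hm0 | hmp
          · exfalso
            have hx1'' : x.toNat = 1 := by omega
            refine absurd (hc hx1 hx100 (by simp; omega)) ?_
            rw [hx1'', List.take_succ_cons, List.take_zero, List.replicate_one]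
            simp
          · exact hmp
        rw [List.foldl_cons, hstep, hx1']
        refine (foldl_bStep_mismatch r m x (cnt + 1) hmpos ?_).symm
        rintro ⟨h1, h2⟩
        refine absurd (hc hx1 hx100 (by simp; omega)) ?_
        rw [hm, List.take_succ_cons, List.replicate_succ, h2]
        simp
      · have hstep : bStep (.run 0 v cnt) x = .fail := by
          simp [bStep]; omega
        rw [List.foldl_cons, hstep, foldl_bStep_fail]
        rfl

theorem main_loop (a : List Int) (v cnt : Int) :
    solveLoop (a.length + 1) a cnt = bFinish (a.foldl bStep (.run 0 v cnt)) :=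
  main_loop_aux (a.length + 1) a (Nat.lt_succ_self _) v cnt

-- ===== VERDICT (by name: the statement is the Claim_ definition above) =====
theorem solve_spec : Claim_equal_solve := by
  intro a _
  unfold Spec_solve solve solve_alt
  exact main_loop a 0 0
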